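-- pv_equiv track=rewrite | github.com/Revisto/codeforces | 2037/b.py | solve
-- ===== SOURCE A (Python) =====
-- from collections import Counter
--
-- def solve(length, mixed_grids):
--     k = length - 2
--     counts = Counter(mixed_grids)
--     mixed_grids_set = set(mixed_grids)
--
--     for a in range(1, int(k ** 0.5) + 1):
--         if k % a == 0:
--             b = k // a
--             if a in mixed_grids_set and b in mixed_grids_set:
--                 if a == b and counts[a] < 2:
--                     continue
--                 return f"{a} {b}"
-- ===== SOURCE B (Python) =====
-- from collections import Counter
--
-- def solve(length, mixed_grids):
--     k = length - 2
--     counts = Counter(mixed_grids)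
--     for v in sorted(counts):
--         if v >= 1 and v * v <= k and k % v == 0:
--             w = k // v
--             if w in counts and (v != w or counts[v] >= 2):
--                 return f"{v} {w}"
--     return None
-- ===== Notes on version B (the rewrite author's own statement) =====
-- stated objective: alternative
-- what changed: Instead of scanning every integer 1..isqrt(k) and testing set membership, B iterates only the distinct grid values in ascending order and tests each for being the smaller member of a present factor pair, using a single Counter for both membership and multiplicity.
import Mathlib
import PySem

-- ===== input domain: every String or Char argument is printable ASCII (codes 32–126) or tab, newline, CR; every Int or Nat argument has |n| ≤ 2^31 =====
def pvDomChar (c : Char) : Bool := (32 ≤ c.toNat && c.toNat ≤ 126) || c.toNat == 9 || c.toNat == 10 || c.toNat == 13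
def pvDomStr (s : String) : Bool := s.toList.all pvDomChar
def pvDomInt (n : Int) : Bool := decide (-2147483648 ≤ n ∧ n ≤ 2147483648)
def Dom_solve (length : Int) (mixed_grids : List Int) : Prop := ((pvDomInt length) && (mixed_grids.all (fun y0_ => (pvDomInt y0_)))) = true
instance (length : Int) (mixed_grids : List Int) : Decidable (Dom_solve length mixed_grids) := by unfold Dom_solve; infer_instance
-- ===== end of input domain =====

set_option maxRecDepth 8192

-- B iterates the distinct grid values in ascending order instead of scanning every integer 1..isqrt(k);
-- same return value on Pre_ (alternative decomposition, no speed claim).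

-- shared helper: the f-string f"{a} {b}" (identical in both Pythons)
def fmtPair (a b : Int) : String := String.ofList (PySem.Int.toChars a ++ ' ' :: PySem.Int.toChars b)

-- ===== PORT A =====
def loopA (k : Int) (s : PySem.Set Int) (counts : PySem.Dict Int Int) : List Int → Option String
  | [] => none
  | a :: rest =>
    if PySem.Int.mod k a = 0 then
      let b := PySem.Int.floordiv k a
      if PySem.Set.contains s a && PySem.Set.contains s b then
        if a == b && decide (counts.getD a 0 < 2) then loopA k s counts rest
        else some (fmtPair a b)
      else loopA k s counts rest
    else loopA k s counts rest

def solve (length : Int) (mixed_grids : List Int) : Option String :=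
  let k := length - 2
  let counts := PySem.Dict.counter mixed_grids
  let mixed_grids_set := PySem.Set.ofList mixed_grids
  -- int(k ** 0.5): for 0 ≤ k ≤ 2^31 (guaranteed by Dom_ and Pre_) the double sqrt is exact,
  -- so this equals Nat.sqrt; for k < 0 Python raises TypeError — excluded by Pre_solve.
  loopA k mixed_grids_set counts (PySem.List.pyRange 1 ((Nat.sqrt k.toNat : Int) + 1) 1)

-- ===== PORT B =====
def loopB (k : Int) (counts : PySem.Dict Int Int) : List Int → Option String
  | [] => none
  | v :: rest =>
    if 1 ≤ v ∧ v * v ≤ k ∧ PySem.Int.mod k v = 0 then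
      let w := PySem.Int.floordiv k v
      if counts.contains w && (v != w || decide (2 ≤ counts.getD v 0)) then
        some (fmtPair v w)
      else loopB k counts rest
    else loopB k counts rest

def solve_alt (length : Int) (mixed_grids : List Int) : Option String :=
  let k := length - 2
  let counts := PySem.Dict.counter mixed_grids
  loopB k counts (PySem.List.sorted counts.keys (fun x => x) false)

-- ===== PRECONDITION & SPEC =====
-- A raises TypeError when k = length - 2 is negative (int() of the complex (k ** 0.5)); Pre_ excludes exactly those inputs.
def Pre_solve (length : Int) (mixed_grids : List Int) : Prop := 2 ≤ length
instance (length : Int) (mixed_grids : List Int) : Decidable (Pre_solve length mixed_grids) := by unfold Pre_solve; infer_instance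
def pvWitness_solve : Int × List Int := (8, [2, 3])

def Spec_solve (length : Int) (mixed_grids : List Int) (out : Option String) : Prop := out = solve_alt length mixed_grids
instance (length : Int) (mixed_grids : List Int) (out : Option String) : Decidable (Spec_solve length mixed_grids out) := by unfold Spec_solve; infer_instance

-- ===== CLAIM (what is proved, stated in full; the proofs are below) =====
def Claim_equal_solve : Prop := ∀ (length : Int) (mixed_grids : List Int), Dom_solve length mixed_grids → Pre_solve length mixed_grids → Spec_solve length mixed_grids (solve length mixed_grids)

-- ===== LEMMAS AND PROOFS =====

-- the success predicate both loops test, as a single Bool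
def okB (k : Int) (xs : List Int) (a : Int) : Bool :=
  decide (1 ≤ a) && decide (a * a ≤ k) && decide (PySem.Int.mod k a = 0) &&
  decide (a ∈ xs) && decide (PySem.Int.floordiv k a ∈ xs) &&
  !(a == PySem.Int.floordiv k a && decide ((xs.count a : Int) < 2))

theorem okB_eq_true_iff (k : Int) (xs : List Int) (a : Int) :
    okB k xs a = true ↔
      1 ≤ a ∧ a * a ≤ k ∧ PySem.Int.mod k a = 0 ∧ a ∈ xs ∧
      PySem.Int.floordiv k a ∈ xs ∧ ¬(a = PySem.Int.floordiv k a ∧ (xs.count a : Int) < 2) := by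
  simp only [okB, Bool.and_eq_true, Bool.not_eq_true', Bool.and_eq_false_iff,
    decide_eq_true_eq, beq_eq_false_iff_ne, decide_eq_false_iff_not, and_assoc]
  tauto

theorem find?_eq_filter_head? {α : Type} (p : α → Bool) (l : List α) :
    l.find? p = (l.filter p).head? := by
  induction l with
  | nil => rfl
  | cons x t ih =>
    by_cases h : p x
    · rw [List.find?_cons_of_pos h, List.filter_cons_of_pos h]; rfl
    · rw [List.find?_cons_of_neg h, List.filter_cons_of_neg h, ih]

theorem find?_eq_of_pairwise_lt (p : Int → Bool) (l₁ l₂ : List Int)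
    (h₁ : l₁.Pairwise (· < ·)) (h₂ : l₂.Pairwise (· < ·))
    (hm : ∀ x, p x = true → (x ∈ l₁ ↔ x ∈ l₂)) : l₁.find? p = l₂.find? p := by
  rw [find?_eq_filter_head?, find?_eq_filter_head?]
  have n₁ : (l₁.filter p).Nodup := (h₁.filter p).nodup
  have n₂ : (l₂.filter p).Nodup := (h₂.filter p).nodup
  have hperm : (l₁.filter p).Perm (l₂.filter p) := by
    rw [List.perm_ext_iff_of_nodup n₁ n₂]
    intro a
    simp only [List.mem_filter]
    constructor
    · rintro ⟨ha, hp⟩; exact ⟨(hm a hp).1 ha, hp⟩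
    · rintro ⟨ha, hp⟩; exact ⟨(hm a hp).2 ha, hp⟩
  rw [List.Perm.eq_of_pairwise (fun a b _ _ hab hba => le_antisymm hab hba)
    ((h₁.filter p).imp le_of_lt) ((h₂.filter p).imp le_of_lt) hperm]

theorem set_contains_of_mem {xs : List Int} {y : Int} (h : y ∈ xs) :
    (PySem.Set.ofList xs).contains y = true :=
  (PySem.Set.contains_iff _ _).2 ((PySem.Set.mem_ofList _ _).2 h)

theorem set_contains_of_not_mem {xs : List Int} {y : Int} (h : y ∉ xs) :
    (PySem.Set.ofList xs).contains y = false := by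
  cases hc : (PySem.Set.ofList xs).contains y
  · rfl
  · exact absurd ((PySem.Set.mem_ofList _ _).1 ((PySem.Set.contains_iff _ _).1 hc)) h

theorem counter_contains_of_mem {xs : List Int} {y : Int} (h : y ∈ xs) :
    (PySem.Dict.counter xs).contains y = true := by
  rw [PySem.Dict.contains_counter]; simpa using h

theorem counter_contains_of_not_mem {xs : List Int} {y : Int} (h : y ∉ xs) :
    (PySem.Dict.counter xs).contains y = false := by
  rw [PySem.Dict.contains_counter]; simpa using h

theorem loopA_eq_find? (k : Int) (xs : List Int) (l : List Int)
    (hl : ∀ a ∈ l, (1 ≤ a ∧ a * a ≤ k)) :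
    loopA k (PySem.Set.ofList xs) (PySem.Dict.counter xs) l
      = (l.find? (okB k xs)).map (fun a => fmtPair a (PySem.Int.floordiv k a)) := by
  induction l with
  | nil => rfl
  | cons a rest ih =>
    have ha := hl a List.mem_cons_self
    have ih' := ih (fun x hx => hl x (List.mem_cons_of_mem a hx))
    have hcount := PySem.Dict.getD_counter xs a
    simp only [loopA]
    by_cases hmod : PySem.Int.mod k a = 0
    · rw [if_pos hmod]
      by_cases h1 : a ∈ xs
      · by_cases h2 : PySem.Int.floordiv k a ∈ xs
        · rw [if_pos (by rw [Bool.and_eq_true]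
                         exact ⟨set_contains_of_mem h1, set_contains_of_mem h2⟩)]
          by_cases h3 : a = PySem.Int.floordiv k a
          · by_cases h4 : ((xs.count a : Int) < 2)
            · rw [if_pos (by simp only [Bool.and_eq_true, beq_iff_eq, decide_eq_true_eq, hcount]
                             exact ⟨h3, h4⟩),
                ih', List.find?_cons_of_neg
                  (fun hok => (((okB_eq_true_iff k xs a).1 hok).2.2.2.2.2) ⟨h3, h4⟩)]
            · rw [if_neg (by simp only [Bool.and_eq_true, beq_iff_eq, decide_eq_true_eq, hcount]
                             exact fun hc => h4 hc.2),
                List.find?_cons_of_pos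
                  ((okB_eq_true_iff k xs a).2 ⟨ha.1, ha.2, hmod, h1, h2, fun hc => h4 hc.2⟩)]
              rfl
          · rw [if_neg (by simp only [Bool.and_eq_true, beq_iff_eq, decide_eq_true_eq, hcount]
                           exact fun hc => h3 hc.1),
              List.find?_cons_of_pos
                ((okB_eq_true_iff k xs a).2 ⟨ha.1, ha.2, hmod, h1, h2, fun hc => h3 hc.1⟩)]
            rfl
        · rw [if_neg (by rw [Bool.and_eq_true, set_contains_of_not_mem h2]
                         rintro ⟨-, hc⟩; exact Bool.false_ne_true hc),
            ih', List.find?_cons_of_neg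
              (fun hok => h2 ((okB_eq_true_iff k xs a).1 hok).2.2.2.2.1)]
      · rw [if_neg (by rw [Bool.and_eq_true, set_contains_of_not_mem h1]
                       rintro ⟨hc, -⟩; exact Bool.false_ne_true hc),
          ih', List.find?_cons_of_neg
            (fun hok => h1 ((okB_eq_true_iff k xs a).1 hok).2.2.2.1)]
    · rw [if_neg hmod, ih', List.find?_cons_of_neg
        (fun hok => hmod ((okB_eq_true_iff k xs a).1 hok).2.2.1)]

theorem loopB_eq_find? (k : Int) (xs : List Int) (l : List Int)
    (hl : ∀ a ∈ l, a ∈ xs) :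
    loopB k (PySem.Dict.counter xs) l
      = (l.find? (okB k xs)).map (fun a => fmtPair a (PySem.Int.floordiv k a)) := by
  induction l with
  | nil => rfl
  | cons v rest ih =>
    have hv := hl v List.mem_cons_self
    have ih' := ih (fun x hx => hl x (List.mem_cons_of_mem v hx))
    have hcount := PySem.Dict.getD_counter xs v
    simp only [loopB]
    by_cases hpre : 1 ≤ v ∧ v * v ≤ k ∧ PySem.Int.mod k v = 0
    · rw [if_pos hpre]
      by_cases h2 : PySem.Int.floordiv k v ∈ xs
      · by_cases h3 : v = PySem.Int.floordiv k v
        · by_cases h4 : ((xs.count v : Int) < 2)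
          · rw [if_neg (by rw [Bool.and_eq_true]
                           rintro ⟨-, hc⟩
                           rw [Bool.or_eq_true] at hc
                           rcases hc with hc | hc
                           · exact (bne_iff_ne.1 hc) h3
                           · have := of_decide_eq_true hc
                             rw [hcount] at this
                             omega),
              ih', List.find?_cons_of_neg
                (fun hok => (((okB_eq_true_iff k xs v).1 hok).2.2.2.2.2) ⟨h3, h4⟩)]
          · rw [if_pos (by rw [Bool.and_eq_true]
                           refine ⟨counter_contains_of_mem h2, ?_⟩
                           rw [Bool.or_eq_true]
                           right
                           rw [decide_eq_true_eq, hcount]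
                           omega),
              List.find?_cons_of_pos
                ((okB_eq_true_iff k xs v).2
                  ⟨hpre.1, hpre.2.1, hpre.2.2, hv, h2, fun hc => h4 hc.2⟩)]
            rfl
        · rw [if_pos (by rw [Bool.and_eq_true]
                         exact ⟨counter_contains_of_mem h2,
                           by rw [Bool.or_eq_true]; exact Or.inl (bne_iff_ne.2 h3)⟩),
            List.find?_cons_of_pos
              ((okB_eq_true_iff k xs v).2
                ⟨hpre.1, hpre.2.1, hpre.2.2, hv, h2, fun hc => h3 hc.1⟩)]
          rfl
      · rw [if_neg (by rw [Bool.and_eq_true, counter_contains_of_not_mem h2]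
                       rintro ⟨hc, -⟩; exact Bool.false_ne_true hc),
          ih', List.find?_cons_of_neg
            (fun hok => h2 ((okB_eq_true_iff k xs v).1 hok).2.2.2.2.1)]
    · rw [if_neg hpre, ih', List.find?_cons_of_neg
        (fun hok => hpre (let c := (okB_eq_true_iff k xs v).1 hok; ⟨c.1, c.2.1, c.2.2.1⟩))]

theorem sqrt_range_iff (k a : Int) (hk : 0 ≤ k) (ha : 1 ≤ a) :
    a * a ≤ k ↔ a < (Nat.sqrt k.toNat : Int) + 1 := by
  have h1 : a * a ≤ k ↔ a.toNat * a.toNat ≤ k.toNat := by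
    constructor
    · intro h
      have : (a.toNat : Int) * a.toNat ≤ (k.toNat : Int) := by
        rw [Int.toNat_of_nonneg (by omega), Int.toNat_of_nonneg hk]; exact h
      exact_mod_cast this
    · intro h
      have : (a.toNat : Int) * a.toNat ≤ (k.toNat : Int) := by exact_mod_cast h
      rw [Int.toNat_of_nonneg (by omega), Int.toNat_of_nonneg hk] at this; exact this
  rw [h1, show a.toNat * a.toNat = a.toNat ^ 2 by ring, ← Nat.le_sqrt']
  omega

theorem solve_eq_solve_alt (length : Int) (mixed_grids : List Int) (hpre : 2 ≤ length) :
    solve length mixed_grids = solve_alt length mixed_grids := by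
  have hk : 0 ≤ length - 2 := by omega
  simp only [solve, solve_alt, PySem.Dict.keys_counter]
  rw [loopA_eq_find? (length - 2) mixed_grids _ (by
    intro a hamem
    rw [PySem.List.mem_pyRange_one] at hamem
    exact ⟨hamem.1, (sqrt_range_iff (length - 2) a hk hamem.1).2 hamem.2⟩)]
  rw [loopB_eq_find? (length - 2) mixed_grids _ (by
    intro a hamem
    rw [PySem.List.mem_sorted] at hamem
    exact (PySem.Set.mem_ofList _ _).1 hamem)]
  congr 1
  apply find?_eq_of_pairwise_lt
  · exact PySem.List.pairwise_lt_pyRange_one 1 _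
  · exact PySem.List.sorted_ofList_pairwise_lt mixed_grids
  · intro x hx
    obtain ⟨h1, h2, _, h4, _, _⟩ := (okB_eq_true_iff (length - 2) mixed_grids x).1 hx
    rw [PySem.List.mem_pyRange_one, PySem.List.mem_sorted, PySem.Set.mem_ofList]
    constructor
    · intro _; exact h4
    · intro _; exact ⟨h1, (sqrt_range_iff (length - 2) x hk h1).1 h2⟩

-- ===== VERDICT (by name: the statement is the Claim_ definition above) =====
theorem solve_spec : Claim_equal_solve := by
  intro length mixed_grids _ hpre
  unfold Spec_solve
  exact solve_eq_solve_alt length mixed_grids hpre
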